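-- pv_equiv track=rewrite | github.com/iTecAI/XoriensLair | api/character.py | get_mod
-- ===== SOURCE A (Python) =====
-- def get_mod(score):
--     modref = {
--         '1':-5,
--         '2-3':-4,
--         '4-5':-3,
--         '6-7':-2,
--         '8-9':-1,
--         '10-11':0,
--         '12-13':1,
--         '14-15':2,
--         '16-17':3,
--         '18-19':4,
--         '20-21':5,
--         '22-23':6,
--         '24-25':7,
--         '26-27':8,
--         '28-29':9,
--         '30':10
--     }
--
--     for k in modref.keys():
--         if str(score) in k.split('-'):
--             return modref[k]
--     return None
-- ===== SOURCE B (Python) =====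
-- def get_mod(score):
--     if 1 <= score <= 30:
--         return (score - 10) // 2
--     return None
-- ===== Notes on version B (the rewrite author's own statement) =====
-- stated objective: simpler
-- what changed: Replaces the 16-entry string table, str(score) conversion and per-key split/membership scan with the closed-form range check 1 <= score <= 30 returning (score - 10) // 2.
import Mathlib
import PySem

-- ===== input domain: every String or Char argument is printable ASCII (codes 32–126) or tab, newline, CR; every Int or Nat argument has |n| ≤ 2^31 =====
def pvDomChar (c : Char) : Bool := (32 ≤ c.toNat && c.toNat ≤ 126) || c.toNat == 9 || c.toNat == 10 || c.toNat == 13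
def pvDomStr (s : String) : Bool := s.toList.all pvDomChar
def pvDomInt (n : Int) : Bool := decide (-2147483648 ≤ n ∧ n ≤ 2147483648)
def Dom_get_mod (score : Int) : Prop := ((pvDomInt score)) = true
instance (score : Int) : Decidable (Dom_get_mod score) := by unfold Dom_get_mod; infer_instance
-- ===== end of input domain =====

-- B replaces A's string table, str() conversion and per-key split/membership scan
-- by the closed-form range check 1 <= score <= 30 with (score - 10) // 2 (objective: simpler).


-- ===== PORT A =====
-- the dict literal modref (insertion order, distinct keys)
def pvModref : PySem.Dict String Int :=
  PySem.Dict.ofList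
  [("1", -5), ("2-3", -4), ("4-5", -3), ("6-7", -2), ("8-9", -1),
   ("10-11", 0), ("12-13", 1), ("14-15", 2), ("16-17", 3), ("18-19", 4),
   ("20-21", 5), ("22-23", 6), ("24-25", 7), ("26-27", 8), ("28-29", 9), ("30", 10)]

-- "for k in modref.keys(): if str(score) in k.split('-'): return modref[k]"
-- (modref[k] is ported as PySem.Dict.get? pvModref k; the key is always present here)
def pvLookup (s : String) : List String → Option Int
  | [] => none
  | k :: ks =>
      if ((PySem.Str.split? k "-").getD []).contains s then PySem.Dict.get? pvModref k
      else pvLookup s ks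

def get_mod (score : Int) : Option Int :=
  pvLookup (PySem.Int.toStr score) (PySem.Dict.keys pvModref)

-- ===== PORT B =====
def get_mod_alt (score : Int) : Option Int :=
  if 1 ≤ score ∧ score ≤ 30 then some (PySem.Int.floordiv (score - 10) 2) else none

-- ===== PRECONDITION & SPEC =====
def Spec_get_mod (score : Int) (out : Option Int) : Prop := out = get_mod_alt score
instance (score : Int) (out : Option Int) : Decidable (Spec_get_mod score out) := by unfold Spec_get_mod; infer_instance

-- ===== CLAIM (what is proved, stated in full; the proofs are below) =====
def Claim_equal_get_mod : Prop := ∀ (score : Int), Dom_get_mod score → Spec_get_mod score (get_mod score)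

-- ===== LEMMAS AND PROOFS =====

-- the 31 endpoint strings of A's table keys, and the same as char lists
def pvEndpoints : List String :=
  ["1", "2", "3", "4", "5", "6", "7", "8", "9", "10", "11", "12", "13", "14", "15", "16", "17", "18", "19", "20", "21", "22", "23", "24", "25", "26", "27", "28", "29", "30"]

def pvEC : List (List Char) :=
  [['1'], ['2'], ['3'], ['4'], ['5'], ['6'], ['7'], ['8'], ['9'], ['1', '0'], ['1', '1'], ['1', '2'], ['1', '3'], ['1', '4'], ['1', '5'], ['1', '6'], ['1', '7'], ['1', '8'], ['1', '9'], ['2', '0'], ['2', '1'], ['2', '2'], ['2', '3'], ['2', '4'], ['2', '5'], ['2', '6'], ['2', '7'], ['2', '8'], ['2', '9'], ['3', '0']]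

-- the lookup loop over A's literal table, with every split and dict access evaluated once
def pvF (s : String) : Option Int :=
  if (["1"] : List String).contains s then some (-5)
  else
  if (["2", "3"] : List String).contains s then some (-4)
  else
  if (["4", "5"] : List String).contains s then some (-3)
  else
  if (["6", "7"] : List String).contains s then some (-2)
  else
  if (["8", "9"] : List String).contains s then some (-1)
  else
  if (["10", "11"] : List String).contains s then some 0
  else
  if (["12", "13"] : List String).contains s then some 1
  else
  if (["14", "15"] : List String).contains s then some 2
  else
  if (["16", "17"] : List String).contains s then some 3
  else
  if (["18", "19"] : List String).contains s then some 4
  else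
  if (["20", "21"] : List String).contains s then some 5
  else
  if (["22", "23"] : List String).contains s then some 6
  else
  if (["24", "25"] : List String).contains s then some 7
  else
  if (["26", "27"] : List String).contains s then some 8
  else
  if (["28", "29"] : List String).contains s then some 9
  else
  if (["30"] : List String).contains s then some 10
  else none

theorem pvLookup_eval (s : String) :
    pvLookup s (PySem.Dict.keys pvModref) = pvF s := by
  have hkeys : PySem.Dict.keys pvModref =
      ["1", "2-3", "4-5", "6-7", "8-9", "10-11", "12-13", "14-15", "16-17", "18-19", "20-21", "22-23", "24-25", "26-27", "28-29", "30"] := by decide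
  rw [hkeys]
  simp only [pvLookup, pvF,
    show (PySem.Str.split? "1" "-").getD [] = ["1"] from by decide,
    show (PySem.Str.split? "2-3" "-").getD [] = ["2", "3"] from by decide,
    show (PySem.Str.split? "4-5" "-").getD [] = ["4", "5"] from by decide,
    show (PySem.Str.split? "6-7" "-").getD [] = ["6", "7"] from by decide,
    show (PySem.Str.split? "8-9" "-").getD [] = ["8", "9"] from by decide,
    show (PySem.Str.split? "10-11" "-").getD [] = ["10", "11"] from by decide,
    show (PySem.Str.split? "12-13" "-").getD [] = ["12", "13"] from by decide,
    show (PySem.Str.split? "14-15" "-").getD [] = ["14", "15"] from by decide,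
    show (PySem.Str.split? "16-17" "-").getD [] = ["16", "17"] from by decide,
    show (PySem.Str.split? "18-19" "-").getD [] = ["18", "19"] from by decide,
    show (PySem.Str.split? "20-21" "-").getD [] = ["20", "21"] from by decide,
    show (PySem.Str.split? "22-23" "-").getD [] = ["22", "23"] from by decide,
    show (PySem.Str.split? "24-25" "-").getD [] = ["24", "25"] from by decide,
    show (PySem.Str.split? "26-27" "-").getD [] = ["26", "27"] from by decide,
    show (PySem.Str.split? "28-29" "-").getD [] = ["28", "29"] from by decide,
    show (PySem.Str.split? "30" "-").getD [] = ["30"] from by decide,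
    show PySem.Dict.get? pvModref "1" = some (-5) from by decide,
    show PySem.Dict.get? pvModref "2-3" = some (-4) from by decide,
    show PySem.Dict.get? pvModref "4-5" = some (-3) from by decide,
    show PySem.Dict.get? pvModref "6-7" = some (-2) from by decide,
    show PySem.Dict.get? pvModref "8-9" = some (-1) from by decide,
    show PySem.Dict.get? pvModref "10-11" = some 0 from by decide,
    show PySem.Dict.get? pvModref "12-13" = some 1 from by decide,
    show PySem.Dict.get? pvModref "14-15" = some 2 from by decide,
    show PySem.Dict.get? pvModref "16-17" = some 3 from by decide,
    show PySem.Dict.get? pvModref "18-19" = some 4 from by decide,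
    show PySem.Dict.get? pvModref "20-21" = some 5 from by decide,
    show PySem.Dict.get? pvModref "22-23" = some 6 from by decide,
    show PySem.Dict.get? pvModref "24-25" = some 7 from by decide,
    show PySem.Dict.get? pvModref "26-27" = some 8 from by decide,
    show PySem.Dict.get? pvModref "28-29" = some 9 from by decide,
    show PySem.Dict.get? pvModref "30" = some 10 from by decide]

theorem pvLookup_none (s : String) (h : s.toList ∉ pvEC) :
    pvLookup s (PySem.Dict.keys pvModref) = none := by
  have hne : ∀ e ∈ pvEndpoints, s ≠ e := by
    have hEC : ∀ e ∈ pvEndpoints, e.toList ∈ pvEC := by decide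
    intro e he hs
    exact h (hs ▸ hEC e he)
  rw [pvLookup_eval]
  simp [pvF, hne "1" (by decide), hne "2" (by decide), hne "3" (by decide), hne "4" (by decide), hne "5" (by decide), hne "6" (by decide), hne "7" (by decide), hne "8" (by decide), hne "9" (by decide), hne "10" (by decide), hne "11" (by decide), hne "12" (by decide), hne "13" (by decide), hne "14" (by decide), hne "15" (by decide), hne "16" (by decide), hne "17" (by decide), hne "18" (by decide), hne "19" (by decide), hne "20" (by decide), hne "21" (by decide), hne "22" (by decide), hne "23" (by decide), hne "24" (by decide), hne "25" (by decide), hne "26" (by decide), hne "27" (by decide), hne "28" (by decide), hne "29" (by decide), hne "30" (by decide)]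

theorem pv_neg_not (score : Int) (h : score < 0) : (PySem.Int.toStr score).toList ∉ pvEC := by
  rw [PySem.Int.toList_toStr]
  simp only [PySem.Int.toChars, if_pos h]
  intro hm
  simp [pvEC] at hm

theorem pv_mid_not : ∀ n : Nat, n < 100 → (n = 0 ∨ 31 ≤ n) → Nat.toDigits 10 n ∉ pvEC := by
  decide

theorem pv_big_not (n : Nat) (h : 100 ≤ n) : Nat.toDigits 10 n ∉ pvEC := by
  intro hm
  have hlen : ∀ l ∈ pvEC, l.length ≤ 2 := by decide
  have h2 : (Nat.toDigits 10 n).length ≤ 2 := hlen _ hm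
  have := (Nat.length_toDigits_le_iff (b := 10) (n := n) (k := 2) (by norm_num) (by norm_num)).mp h2
  omega

theorem pv_range : ∀ n : Nat, n < 31 → pvF (PySem.Int.toStr (n : Int)) = get_mod_alt (n : Int) := by
  decide

-- ===== VERDICT (by name: the statement is the Claim_ definition above) =====
theorem get_mod_spec : Claim_equal_get_mod := by
  intro score _
  unfold Spec_get_mod
  show pvLookup (PySem.Int.toStr score) (PySem.Dict.keys pvModref) = get_mod_alt score
  by_cases hin : 1 ≤ score ∧ score ≤ 30
  · have hs : score = ((score.toNat : Nat) : Int) := by omega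
    rw [hs, pvLookup_eval]
    exact pv_range score.toNat (by omega)
  · have halt : get_mod_alt score = none := by simp [get_mod_alt, hin]
    rw [halt]
    apply pvLookup_none
    by_cases hneg : score < 0
    · exact pv_neg_not score hneg
    · rw [PySem.Int.toList_toStr]
      have htc : PySem.Int.toChars score = Nat.toDigits 10 score.toNat := by
        unfold PySem.Int.toChars
        rw [if_neg (show ¬ score < 0 by omega)]
      rw [htc]
      by_cases hbig : 100 ≤ score.toNat
      · exact pv_big_not _ hbig
      · exact pv_mid_not _ (by omega) (by omega)
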